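-- pv_equiv track=rewrite | github.com/ureka-algo-study/algo-class2-group2 | 가원/week3/389479_서버증설횟수.py | solution
-- ===== SOURCE A (Python) =====
-- from typing import List
--
-- def solution(players: List[int], m: int, k: int) -> int:
--     needed: List[int] = []
--     added: List[int] = [0] * 24
--
--     answer: int = 0
--     for i, p in enumerate(players):
--         needed.append(p // m)
--         live_server = sum(added[max(0, i - k + 1): i + 1])
--         added[i] = max(0, needed[i] - live_server)
--         answer += added[i]
--
--     return answer
-- ===== SOURCE B (Python) =====
-- def solution(players, m, k):
--     # Single pass with a queue of live additions and a running sum,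
--     # instead of re-summing the added[] window at every hour.
--     live = []   # (hour, amount) of additions; live[head:] are still alive
--     head = 0
--     S = 0       # sum of amounts in live[head:]
--     answer = 0
--     for i, p in enumerate(players):
--         while head < len(live) and live[head][0] < i - k + 1:
--             S -= live[head][1]
--             head += 1
--         need = p // m - S
--         add = need if need > 0 else 0
--         answer += add
--         S += add
--         live.append((i, add))
--     return answer
-- ===== Notes on version B (the rewrite author's own statement) =====
-- stated objective: alternative
-- what changed: Replaces the per-hour re-summing of the added[] window slice with a single pass that maintains a queue of live additions and a running sum, subtracting expired additions as the window slides.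
import Mathlib
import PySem

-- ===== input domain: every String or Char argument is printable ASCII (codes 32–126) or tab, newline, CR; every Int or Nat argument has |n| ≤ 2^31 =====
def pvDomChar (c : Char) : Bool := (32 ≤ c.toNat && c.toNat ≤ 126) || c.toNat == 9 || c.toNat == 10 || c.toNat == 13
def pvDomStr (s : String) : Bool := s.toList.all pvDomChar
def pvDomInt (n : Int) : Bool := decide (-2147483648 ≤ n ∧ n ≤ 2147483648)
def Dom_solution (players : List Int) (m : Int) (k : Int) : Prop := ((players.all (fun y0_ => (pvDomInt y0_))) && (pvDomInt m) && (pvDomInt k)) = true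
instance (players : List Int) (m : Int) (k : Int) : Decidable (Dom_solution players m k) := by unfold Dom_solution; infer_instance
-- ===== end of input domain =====

-- B replaces A's per-hour re-summing of the added[] window by a single pass that keeps
-- a queue of live additions and a running sum (same return value on Pre_).

-- ===== PORT A =====
-- state: (needed, added, answer)
def stepA (m k : Int) (st : List Int × List Int × Int) (ip : Int × Int) : List Int × List Int × Int :=
  let needed := st.1 ++ [PySem.Int.floordiv ip.2 m]
  let live := (PySem.List.slice st.2.1 (some (max 0 (ip.1 - k + 1))) (some (ip.1 + 1))).sum
  let a := max 0 (PySem.List.pyGetD needed ip.1 0 - live)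
  let added := PySem.List.pySetD st.2.1 ip.1 a
  (needed, added, st.2.2 + a)

def solution (players : List Int) (m : Int) (k : Int) : Int :=
  ((PySem.List.enumerate players 0).foldl (stepA m k) ([], List.replicate 24 0, 0)).2.2

-- ===== PORT B =====
-- the `while` loop advancing `head` past expired queue entries: here the consumed
-- prefix is dropped from the list front instead of advancing an index (same queue).
def dropExpired (live : List (Int × Int)) (S : Int) (cut : Int) : List (Int × Int) × Int :=
  match live with
  | [] => ([], S)
  | (j, a) :: rest => if j < cut then dropExpired rest (S - a) cut else ((j, a) :: rest, S)

-- state: (live, S, answer)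
def stepB (m k : Int) (st : List (Int × Int) × Int × Int) (ip : Int × Int) : List (Int × Int) × Int × Int :=
  let ds := dropExpired st.1 st.2.1 (ip.1 - k + 1)
  let need := PySem.Int.floordiv ip.2 m - ds.2
  let add := if need > 0 then need else 0
  (ds.1 ++ [(ip.1, add)], ds.2 + add, st.2.2 + add)

def solution_alt (players : List Int) (m : Int) (k : Int) : Int :=
  ((PySem.List.enumerate players 0).foldl (stepB m k) ([], 0, 0)).2.2

-- ===== PRECONDITION & SPEC =====
-- Pre_ excludes exactly the inputs where Python A raises: m = 0 (ZeroDivisionError at p // m)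
-- and more than 24 players (IndexError writing added[i] past the fixed 24-slot array).
def Pre_solution (players : List Int) (m : Int) (k : Int) : Prop :=
  players.length ≤ 24 ∧ m ≠ 0
instance (players : List Int) (m : Int) (k : Int) : Decidable (Pre_solution players m k) := by
  unfold Pre_solution; infer_instance

def pvWitness_solution : List Int × Int × Int := ([10, 5, 30], 3, 2)

def Spec_solution (players : List Int) (m : Int) (k : Int) (out : Int) : Prop := out = solution_alt players m k
instance (players : List Int) (m : Int) (k : Int) (out : Int) : Decidable (Spec_solution players m k out) := by unfold Spec_solution; infer_instance

-- ===== CLAIM (what is proved, stated in full; the proofs are below) =====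
def Claim_equal_solution : Prop := ∀ (players : List Int) (m : Int) (k : Int), Dom_solution players m k → Pre_solution players m k → Spec_solution players m k (solution players m k)


-- ===== LEMMAS AND PROOFS =====

lemma dropExpired_spec (L : List (Int × Int)) (cut : Int)
    (hL : L.Pairwise (fun p q : Int × Int => p.1 < q.1)) :
    dropExpired L ((L.map (·.2)).sum) cut
      = (L.filter (fun p => decide (cut ≤ p.1)),
         ((L.filter (fun p => decide (cut ≤ p.1))).map (·.2)).sum) := by
  induction L with
  | nil => simp [dropExpired]
  | cons hd tl ih =>
    obtain ⟨j, a⟩ := hd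
    rw [List.pairwise_cons] at hL
    by_cases hj : j < cut
    · simp only [dropExpired, if_pos hj, List.map_cons, List.sum_cons]
      rw [show a + (tl.map (·.2)).sum - a = (tl.map (·.2)).sum by ring]
      rw [ih hL.2]
      simp [show ¬(cut ≤ j) by omega]
    · have hall : ∀ p ∈ tl, decide (cut ≤ p.1) = true := by
        intro p hp; simpa using le_trans (not_lt.mp hj) (le_of_lt (hL.1 p hp))
      have : ((j, a) :: tl).filter (fun p => decide (cut ≤ p.1)) = (j, a) :: tl := by
        rw [List.filter_cons]
        simp only [show (decide (cut ≤ j)) = true by simpa using not_lt.mp hj, if_true]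
        rw [List.filter_eq_self.mpr hall]
      simp [dropExpired, if_neg hj, this]

lemma filt_enum (as : List Int) (s c : Int) :
    ((PySem.List.enumerate as s).filter (fun p => decide (c ≤ p.1))).map (·.2)
      = as.drop (c - s).toNat := by
  induction as generalizing s with
  | nil => simp [PySem.List.enumerate_nil]
  | cons x tl ih =>
    rw [PySem.List.enumerate_cons, List.filter_cons]
    by_cases hc : c ≤ s
    · simp only [show (decide (c ≤ s)) = true by simpa using hc, if_true, List.map_cons]
      rw [ih (s+1), show (c - (s+1)).toNat = 0 by omega, show (c - s).toNat = 0 by omega]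
      simp
    · simp only [show (decide (c ≤ s)) = false by simpa using hc, Bool.false_eq_true, if_false]
      rw [ih (s+1)]
      rw [show (c - s).toNat = (c - (s+1)).toNat + 1 by omega]
      simp [List.drop_succ_cons]

lemma sum_take_drop_zeros (as : List Int) (z d t : Nat) :
    ((((as ++ List.replicate z 0).drop d).take t)).sum = (((as.drop d).take t)).sum := by
  rw [List.drop_append, List.take_append, List.sum_append]
  have : (((List.replicate z (0:Int)).drop (d - as.length)).take (t - ((as.drop d).length))).sum = 0 := by
    rw [List.drop_replicate, List.take_replicate]
    simp
  rw [this, add_zero]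

lemma main_lemma (m k : Int) (rest as needed : List Int) (ans : Int)
    (hn : needed.length = as.length) (hlen : as.length + rest.length ≤ 24) :
    ((PySem.List.enumerate rest (as.length : Int)).foldl (stepA m k)
        (needed, as ++ List.replicate (24 - as.length) 0, ans)).2.2
      = ((PySem.List.enumerate rest (as.length : Int)).foldl (stepB m k)
        ((PySem.List.enumerate as 0).filter (fun p => decide ((as.length : Int) - max k 1 ≤ p.1)),
         (((PySem.List.enumerate as 0).filter (fun p => decide ((as.length : Int) - max k 1 ≤ p.1))).map (·.2)).sum,
         ans)).2.2 := by
  induction rest generalizing as needed ans with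
  | nil => simp [PySem.List.enumerate_nil]
  | cons p rest' ih =>
    rw [PySem.List.enumerate_cons, List.foldl_cons, List.foldl_cons]
    have hi23 : as.length ≤ 23 := by simp at hlen; omega
    set i := as.length with hidef
    set E := PySem.List.enumerate as 0 with hE
    set q := PySem.Int.floordiv p m with hq
    set cut := (i : Int) - k + 1 with hcut
    set aA := max 0 (q - (as.drop cut.toNat).sum) with haA
    -- facts about E
    have hmemE : ∀ pr ∈ E, pr.1 < (i : Int) := by
      intro pr hpr
      rw [hE, PySem.List.mem_enumerate_iff] at hpr
      obtain ⟨t, ht, rfl⟩ := hpr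
      simpa using ht
    -- step A computes the expected state
    have hget : PySem.List.pyGetD (needed ++ [q]) (i : Int) 0 = q := by
      rw [show (i : Int) = ((needed.length : Nat) : Int) by rw [hn], PySem.List.pyGetD_natCast]
      simp [List.getD_eq_getElem?_getD]
    have hliveA : (PySem.List.slice (as ++ List.replicate (24 - i) 0)
        (some (max 0 ((i : Int) - k + 1))) (some ((i : Int) + 1))).sum = (as.drop cut.toNat).sum := by
      rw [PySem.List.slice_toNat _ (le_max_left 0 _) (by omega)]
      rw [sum_take_drop_zeros]
      rw [show (max 0 ((i:Int) - k + 1)).toNat = cut.toNat by omega]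
      rw [show ((i:Int) + 1).toNat = i + 1 by omega]
      by_cases h : cut.toNat ≤ i
      · rw [List.take_of_length_le (by simp; omega)]
      · rw [List.drop_eq_nil_of_le (by omega)]
        simp
    have hset : PySem.List.pySetD (as ++ List.replicate (24 - i) 0) (i : Int) aA
        = (as ++ [aA]) ++ List.replicate (24 - (i + 1)) 0 := by
      rw [PySem.List.pySetD_natCast]
      rw [show 24 - i = (24 - (i + 1)) + 1 by omega, List.replicate_succ]
      rw [show i = as.length from hidef, List.set_append]
      simp
    have hstepA : stepA m k (needed, as ++ List.replicate (24 - i) 0, ans) ((i : Int), p)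
        = (needed ++ [q], (as ++ [aA]) ++ List.replicate (24 - (i + 1)) 0, ans + aA) := by
      simp only [stepA, ← hq, hget, hliveA, ← haA, hset]
    -- step B computes the expected state
    set lb := (i : Int) - max k 1 with hlb
    set Lf := E.filter (fun pr => decide (lb ≤ pr.1)) with hLf
    set N := E.filter (fun pr => decide (cut ≤ pr.1)) ++ [((i : Int), aA)] with hN
    have hpw : Lf.Pairwise (fun p q : Int × Int => p.1 < q.1) :=
      (PySem.List.pairwise_lt_enumerate as 0).filter _
    have hfilt2 : Lf.filter (fun pr => decide (cut ≤ pr.1)) = E.filter (fun pr => decide (cut ≤ pr.1)) := by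
      rw [hLf, List.filter_filter]
      apply List.filter_congr
      intro pr _
      by_cases h : cut ≤ pr.1
      · simp only [h, decide_true, Bool.true_and]
        simp; omega
      · simp [h]
    have hSB : ((E.filter (fun pr => decide (cut ≤ pr.1))).map (·.2)).sum = (as.drop cut.toNat).sum := by
      rw [hE, filt_enum, sub_zero]
    have hdrop : dropExpired Lf ((Lf.map (·.2)).sum) cut
        = (E.filter (fun pr => decide (cut ≤ pr.1)), (as.drop cut.toNat).sum) := by
      rw [dropExpired_spec _ _ hpw, hfilt2, hSB]
    have hstepB : stepB m k (Lf, (Lf.map (·.2)).sum, ans) ((i : Int), p)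
        = (N, (N.map (·.2)).sum, ans + aA) := by
      simp only [stepB, ← hq]
      rw [← hcut, hdrop]
      rw [show (if q - (as.drop cut.toNat).sum > 0 then q - (as.drop cut.toNat).sum else 0) = aA by omega]
      rw [hN]
      simp [hSB]
    rw [hstepA, hstepB]
    -- reshape B's state into the inductive form for as ++ [aA]
    have hnewfilt : (PySem.List.enumerate (as ++ [aA]) 0).filter
        (fun pr => decide (((as ++ [aA]).length : Int) - max k 1 ≤ pr.1)) = N := by
      rw [PySem.List.enumerate_append, List.filter_append]
      have h1 : (PySem.List.enumerate [aA] (0 + (as.length : Int))).filter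
          (fun pr => decide (((as ++ [aA]).length : Int) - max k 1 ≤ pr.1)) = [((i : Int), aA)] := by
        rw [PySem.List.enumerate_cons, PySem.List.enumerate_nil]
        simp only [List.filter_cons, List.filter_nil]
        rw [if_pos (by simp; try omega)]
        rw [hidef]
        simp
      have h2 : E.filter (fun pr => decide (((as ++ [aA]).length : Int) - max k 1 ≤ pr.1))
          = E.filter (fun pr => decide (cut ≤ pr.1)) := by
        apply List.filter_congr
        intro pr hpr
        have := hmemE pr hpr
        simp only [decide_eq_decide, List.length_append, List.length_singleton]
        push_cast
        omega
      rw [h1, h2, hN]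
    have hlencast : ((as ++ [aA]).length : Int) = (i : Int) + 1 := by
      simp [hidef]
    rw [← hnewfilt, ← hlencast,
      show 24 - (i + 1) = 24 - ((as ++ [aA]).length) by rw [hidef]; simp]
    exact ih (as ++ [aA]) (needed ++ [q]) (ans + aA) (by simp [hn, hidef]) (by simp at hlen ⊢; omega)

-- ===== VERDICT (by name: the statement is the Claim_ definition above) =====
theorem solution_spec : Claim_equal_solution := by
  intro players m k _hdom hpre
  unfold Spec_solution solution solution_alt
  have h := main_lemma m k players [] [] 0 rfl (by simpa using hpre.1)
  simpa using h
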